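-- pv_equiv track=rewrite | github.com/LoicGrobol/scorch | scorch/scores.py | links_from_clusters
-- ===== SOURCE A (Python) =====
-- import itertools as it
-- import typing as ty
--
-- def links_from_clusters(clusters: ty.Iterable[ty.Set]
--                         ) -> ty.Tuple[ty.List[ty.Tuple[ty.Hashable, ty.Hashable]],
--                                       ty.List[ty.Tuple[ty.Hashable, ty.Hashable]]]:
--     r'''
--     Return a `(coreference_links, non-coreference_links)` tuple corresponding to a clustering.
--     '''
--     clusters_lst = list(clusters)
--     elements = sorted(set.union(*clusters_lst))
--     C = []
--     N = []
--     for i, j in it.combinations(elements, 2):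
--         if i == j:
--             continue
--         elif any(c for c in clusters_lst if i in c and j in c):
--             C.append((i, j))
--         else:
--             N.append((i, j))
--     return C, N
-- ===== SOURCE B (Python) =====
-- import itertools as it
-- import typing as ty
--
-- def links_from_clusters(clusters: ty.Iterable[ty.Set]
--                         ) -> ty.Tuple[ty.List[ty.Tuple[ty.Hashable, ty.Hashable]],
--                                       ty.List[ty.Tuple[ty.Hashable, ty.Hashable]]]:
--     '''Return a `(coreference_links, non-coreference_links)` tuple corresponding to a clustering.'''
--     clusters_lst = list(clusters)
--     coref = set()
--     for c in clusters_lst: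
--         coref.update(it.combinations(sorted(c), 2))
--     elements = sorted(set.union(*clusters_lst))
--     pairs = list(it.combinations(elements, 2))
--     C = [p for p in pairs if p in coref]
--     N = [p for p in pairs if p not in coref]
--     return C, N
-- ===== Notes on version B (the rewrite author's own statement) =====
-- stated objective: faster
-- what changed: B precomputes the coreference pair set once by enumerating combinations inside each cluster, then splits the global element pairs by an O(1) set-membership test, removing A's per-pair scan over all clusters.
-- outside the precondition, e.g. on links_from_clusters([]): A raises TypeError, B raises TypeError
import Mathlib
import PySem

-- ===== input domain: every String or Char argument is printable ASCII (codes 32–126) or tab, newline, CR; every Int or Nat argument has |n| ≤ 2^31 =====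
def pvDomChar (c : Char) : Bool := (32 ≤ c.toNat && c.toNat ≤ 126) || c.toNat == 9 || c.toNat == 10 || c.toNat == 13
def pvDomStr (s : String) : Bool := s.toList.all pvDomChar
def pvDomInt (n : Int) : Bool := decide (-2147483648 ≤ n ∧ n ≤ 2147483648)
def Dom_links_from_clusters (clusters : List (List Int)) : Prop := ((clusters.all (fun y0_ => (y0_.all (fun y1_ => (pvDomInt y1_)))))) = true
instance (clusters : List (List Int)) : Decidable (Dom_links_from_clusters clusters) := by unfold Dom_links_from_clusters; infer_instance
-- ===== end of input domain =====

-- B builds the coreference pair set once per cluster and splits global pairs by set membership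
-- instead of rescanning every cluster for every pair (objective: faster).


-- ===== PORT A =====
-- A: elements = sorted(set.union(*clusters)); for each pair from combinations(elements, 2),
-- scan all clusters for one containing both ends.
def links_from_clusters (clusters : List (List Int)) : (List (Int × Int)) × (List (Int × Int)) :=
  let elements := PySem.List.sorted (PySem.Set.ofList clusters.flatten) (fun x => x)
  (PySem.List.combinations elements 2).foldl
    (fun CN p =>
      match p with
      | i :: j :: _ =>
        if i = j then CN
        else if clusters.any (fun c => c.contains i && c.contains j) then (CN.1 ++ [(i, j)], CN.2)
        else (CN.1, CN.2 ++ [(i, j)])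
      | _ => CN)
    ([], [])

-- ===== PORT B =====
-- a 2-element tuple from itertools.combinations(_, 2) (only ever applied to length-2 lists)
def pvToPair (l : List Int) : Int × Int :=
  (l.headD 0, l.tail.headD 0)

def links_from_clusters_alt (clusters : List (List Int)) : (List (Int × Int)) × (List (Int × Int)) :=
  let coref := clusters.foldl
    (fun s c => PySem.Set.update s
      ((PySem.List.combinations (PySem.List.sorted (PySem.Set.ofList c) (fun x => x)) 2).map pvToPair))
    PySem.Set.empty
  let elements := PySem.List.sorted (PySem.Set.ofList clusters.flatten) (fun x => x)
  let pairs := (PySem.List.combinations elements 2).map pvToPair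
  (pairs.filter (fun p => coref.contains p), pairs.filter (fun p => !coref.contains p))

-- ===== PRECONDITION & SPEC =====
-- A raises TypeError on clusters = [] (set.union() with no argument); B raises there too.
def Pre_links_from_clusters (clusters : List (List Int)) : Prop := clusters ≠ []
instance (clusters : List (List Int)) : Decidable (Pre_links_from_clusters clusters) := by unfold Pre_links_from_clusters; infer_instance
def pvWitness_links_from_clusters : List (List Int) := [[1, 3], [2, 3]]

def Spec_links_from_clusters (clusters : List (List Int)) (out : (List (Int × Int)) × (List (Int × Int))) : Prop := out = links_from_clusters_alt clusters
instance (clusters : List (List Int)) (out : (List (Int × Int)) × (List (Int × Int))) : Decidable (Spec_links_from_clusters clusters out) := by unfold Spec_links_from_clusters; infer_instance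

-- ===== CLAIM (what is proved, stated in full; the proofs are below) =====
def Claim_equal_links_from_clusters : Prop := ∀ (clusters : List (List Int)), Dom_links_from_clusters clusters → Pre_links_from_clusters clusters → Spec_links_from_clusters clusters (links_from_clusters clusters)

-- ===== LEMMAS AND PROOFS =====

-- in a strictly increasing list, two members i < j form the sublist [i, j]
lemma pair_sublist_iff {i j : Int} (s : List Int) (hs : s.Pairwise (· < ·)) (hij : i < j) :
    [i, j].Sublist s ↔ i ∈ s ∧ j ∈ s := by
  constructor
  · intro h
    exact ⟨h.mem (by simp), h.mem (by simp)⟩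
  · rintro ⟨hi, hj⟩
    induction s with
    | nil => simp at hi
    | cons a t ih =>
      rcases List.pairwise_cons.mp hs with ⟨ha, ht⟩
      rcases List.mem_cons.mp hi with hia | hit
      · subst hia
        have hjt : j ∈ t := by
          rcases List.mem_cons.mp hj with hja | hjt
          · omega
          · exact hjt
        exact List.Sublist.cons₂ _ (List.singleton_sublist.mpr hjt)
      · have hjt : j ∈ t := by
          rcases List.mem_cons.mp hj with hja | hjt
          · have := ha i hit; omega
          · exact hjt
        exact List.Sublist.cons _ (ih ht hit hjt)

-- membership in B's coref accumulator
lemma mem_coref_foldl (clusters : List (List Int)) (s : PySem.Set (Int × Int)) (q : Int × Int) :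
    q ∈ clusters.foldl
      (fun s c => PySem.Set.update s
        ((PySem.List.combinations (PySem.List.sorted (PySem.Set.ofList c) (fun x => x)) 2).map pvToPair)) s
    ↔ q ∈ s ∨ ∃ c ∈ clusters,
        q ∈ (PySem.List.combinations (PySem.List.sorted (PySem.Set.ofList c) (fun x => x)) 2).map pvToPair := by
  induction clusters generalizing s with
  | nil => simp
  | cons c t ih =>
    simp only [List.foldl_cons, ih, PySem.Set.mem_update, List.mem_cons]
    constructor
    · rintro (h | h)
      · rcases h with h | h
        · exact Or.inl h
        · exact Or.inr ⟨c, Or.inl rfl, h⟩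
      · rcases h with ⟨d, hd, hq⟩
        exact Or.inr ⟨d, Or.inr hd, hq⟩
    · rintro (h | ⟨d, hd | hd, hq⟩)
      · exact Or.inl (Or.inl h)
      · exact Or.inl (Or.inr (hd ▸ hq))
      · exact Or.inr ⟨d, hd, hq⟩

-- a pair (i, j) with i < j is in a cluster's local combination list iff both ends are in the cluster
lemma mem_local_comb_iff (c : List Int) {i j : Int} (hij : i < j) :
    (i, j) ∈ (PySem.List.combinations (PySem.List.sorted (PySem.Set.ofList c) (fun x => x)) 2).map pvToPair
    ↔ i ∈ c ∧ j ∈ c := by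
  have hpw := PySem.List.sorted_ofList_pairwise_lt (κ := Int) c
  constructor
  · rintro h
    rcases List.mem_map.mp h with ⟨l, hl, hpl⟩
    rcases PySem.List.mem_combinations_iff _ _ _ |>.mp hl with ⟨hsub, hlen⟩
    obtain ⟨a, b, rfl⟩ : ∃ a b, l = [a, b] := by
      match l, hlen with
      | [a, b], _ => exact ⟨a, b, rfl⟩
    rw [show pvToPair [a, b] = (a, b) from rfl] at hpl
    cases hpl
    have hi := hsub.mem (show i ∈ [i, j] by simp)
    have hj := hsub.mem (show j ∈ [i, j] by simp)
    rw [PySem.List.mem_sorted, PySem.Set.mem_ofList] at hi hj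
    exact ⟨hi, hj⟩
  · rintro ⟨hi, hj⟩
    have hi' : i ∈ PySem.List.sorted (PySem.Set.ofList c) (fun x => x) := by
      rw [PySem.List.mem_sorted, PySem.Set.mem_ofList]; exact hi
    have hj' : j ∈ PySem.List.sorted (PySem.Set.ofList c) (fun x => x) := by
      rw [PySem.List.mem_sorted, PySem.Set.mem_ofList]; exact hj
    have hsub : [i, j].Sublist _ := (pair_sublist_iff _ hpw hij).mpr ⟨hi', hj'⟩
    exact List.mem_map.mpr ⟨[i, j], (PySem.List.mem_combinations_iff _ _ _).mpr ⟨hsub, rfl⟩, rfl⟩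

-- the coref test agrees with A's per-pair cluster scan
lemma coref_contains_iff (clusters : List (List Int)) {i j : Int} (hij : i < j) :
    (clusters.foldl
      (fun s c => PySem.Set.update s
        ((PySem.List.combinations (PySem.List.sorted (PySem.Set.ofList c) (fun x => x)) 2).map pvToPair))
      PySem.Set.empty).contains (i, j)
    = clusters.any (fun c => c.contains i && c.contains j) := by
  rw [Bool.eq_iff_iff, PySem.Set.contains_iff]
  simp only [List.any_eq_true]
  rw [mem_coref_foldl]
  simp only [PySem.Set.empty, List.not_mem_nil, false_or, Bool.and_eq_true, List.contains_iff_mem]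
  constructor
  · rintro ⟨c, hc, hq⟩
    exact ⟨c, hc, (mem_local_comb_iff c hij).mp hq⟩
  · rintro ⟨c, hc, hi, hj⟩
    exact ⟨c, hc, (mem_local_comb_iff c hij).mpr ⟨hi, hj⟩⟩

-- generic partition fold: A's appending loop is two filters
lemma foldl_partition {α β : Type} (l : List α) (q : α → Bool) (f : α → β) (c0 n0 : List β) :
    l.foldl (fun CN x => if q x then (CN.1 ++ [f x], CN.2) else (CN.1, CN.2 ++ [f x])) (c0, n0)
    = (c0 ++ (l.filter q).map f, n0 ++ (l.filter (fun x => !q x)).map f) := by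
  induction l generalizing c0 n0 with
  | nil => simp
  | cons x t ih =>
    by_cases h : q x = true
    · simp [h, ih]
    · simp only [Bool.not_eq_true] at h
      simp [h, ih]

-- every member of combinations(elements, 2) is [i, j] with i < j
lemma comb2_shape (clusters : List (List Int)) (p : List Int)
    (hp : p ∈ PySem.List.combinations (PySem.List.sorted (PySem.Set.ofList clusters.flatten) (fun x => x)) 2) :
    ∃ i j, p = [i, j] ∧ i < j := by
  rcases (PySem.List.mem_combinations_iff _ _ _).mp hp with ⟨hsub, hlen⟩
  have hpw := PySem.List.sorted_ofList_pairwise_lt (κ := Int) clusters.flatten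
  match p, hlen with
  | [i, j], _ =>
    have : [i, j].Pairwise (· < ·) := List.Pairwise.sublist hsub hpw
    exact ⟨i, j, rfl, by simpa using this⟩

-- ===== VERDICT (by name: the statement is the Claim_ definition above) =====
theorem links_from_clusters_spec : Claim_equal_links_from_clusters := by
  intro clusters _ _
  unfold Spec_links_from_clusters links_from_clusters links_from_clusters_alt
  set coref := clusters.foldl
    (fun s c => PySem.Set.update s
      ((PySem.List.combinations (PySem.List.sorted (PySem.Set.ofList c) (fun x => x)) 2).map pvToPair))
    PySem.Set.empty with hcoref
  set elements := PySem.List.sorted (PySem.Set.ofList clusters.flatten) (fun x => x) with helems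
  have hcongr : (PySem.List.combinations elements 2).foldl
      (fun CN p =>
        match p with
        | i :: j :: _ =>
          if i = j then CN
          else if clusters.any (fun c => c.contains i && c.contains j) then (CN.1 ++ [(i, j)], CN.2)
          else (CN.1, CN.2 ++ [(i, j)])
        | _ => CN)
      ([], [])
      = (PySem.List.combinations elements 2).foldl
      (fun CN p =>
        if coref.contains (pvToPair p) then (CN.1 ++ [pvToPair p], CN.2)
        else (CN.1, CN.2 ++ [pvToPair p]))
      ([], []) := by
    apply PySem.List.foldl_congr_mem
    intro acc p hp
    rcases comb2_shape clusters p hp with ⟨i, j, rfl, hij⟩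
    have hne : ¬ i = j := by omega
    rw [show pvToPair [i, j] = (i, j) from rfl]
    simp only [hne, if_false]
    rw [hcoref, coref_contains_iff clusters hij]
  rw [hcongr, foldl_partition]
  simp [List.filter_map, Function.comp_def]
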